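-- pv_equiv track=rewrite | github.com/MaximPovolotskii/Distortion | int3.py | sign_int3
-- ===== SOURCE A (Python) =====
-- def sign_int3(content):
--     sample_b = []
--     for i in range(len(content)):
--         sample_b.append(content[i])
--     for i in range(len(sample_b) // 3):
--         if sample_b[3 * i + 2] > 127:
--             sample_b[3 * i + 2] = sample_b[3 * i + 2] - 255
--             sample_b[3 * i + 1] = sample_b[3 * i + 1] - 255
--             sample_b[3 * i] = sample_b[3 * i] - 256
--     return sample_b
-- ===== SOURCE B (Python) =====
-- def sign_int3(content):
--     n = len(content)
--     flagged = {j for j in range(n) if j % 3 == 2 and content[j] > 127}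
--     return [content[i] - (256 if i % 3 == 0 else 255) if i - i % 3 + 2 in flagged
--             else content[i]
--             for i in range(n)]
-- ===== Notes on version B (the rewrite author's own statement) =====
-- stated objective: alternative
-- what changed: B first computes the set of flagged third-element indices (j % 3 == 2 and value > 127) and then builds the output with a single index-arithmetic map that subtracts 256/255 at positions whose triple's third index is in that set, instead of A's full copy pass followed by an in-place per-triple mutation loop over range(len//3).
import Mathlib
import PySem

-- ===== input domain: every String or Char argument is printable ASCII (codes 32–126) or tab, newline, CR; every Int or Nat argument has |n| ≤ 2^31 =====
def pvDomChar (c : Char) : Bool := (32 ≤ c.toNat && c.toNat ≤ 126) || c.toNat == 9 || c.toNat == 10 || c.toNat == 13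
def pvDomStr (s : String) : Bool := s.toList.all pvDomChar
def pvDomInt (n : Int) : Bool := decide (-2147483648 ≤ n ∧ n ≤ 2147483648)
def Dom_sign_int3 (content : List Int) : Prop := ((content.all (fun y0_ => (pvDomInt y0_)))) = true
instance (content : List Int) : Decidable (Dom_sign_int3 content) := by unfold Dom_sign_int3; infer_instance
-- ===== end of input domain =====

-- B precomputes the set of flagged third-element indices (j % 3 == 2, value > 127) and then
-- builds the output by an index-arithmetic map over all positions, instead of A's copy pass
-- followed by an in-place triple-mutation pass; objective: alternative.


-- ===== PORT A =====
-- one body of A's second loop (indices 3i..3i+2 are always in range, so pyGetD/pySetD are exact)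
def signA_step (sb : List Int) (i : Int) : List Int :=
  if PySem.List.pyGetD sb (3 * i + 2) 0 > 127 then
    let sb := PySem.List.pySetD sb (3 * i + 2) (PySem.List.pyGetD sb (3 * i + 2) 0 - 255)
    let sb := PySem.List.pySetD sb (3 * i + 1) (PySem.List.pyGetD sb (3 * i + 1) 0 - 255)
    PySem.List.pySetD sb (3 * i) (PySem.List.pyGetD sb (3 * i) 0 - 256)
  else sb

def sign_int3 (content : List Int) : List Int :=
  let sample_b :=
    (PySem.List.pyRange 0 (content.length : Int) 1).foldl
      (fun sb i => sb ++ [PySem.List.pyGetD content i 0]) []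
  (PySem.List.pyRange 0 (PySem.Int.floordiv (sample_b.length : Int) 3) 1).foldl
    signA_step sample_b

-- ===== PORT B =====
-- the set comprehension: flagged third-element positions
def signB_flagged (content : List Int) : PySem.Set Int :=
  PySem.Set.ofList ((PySem.List.pyRange 0 (content.length : Int) 1).filter
    (fun j => (PySem.Int.mod j 3 == 2) && decide (PySem.List.pyGetD content j 0 > 127)))

-- the body of the list comprehension
def signB_elem (content : List Int) (flagged : PySem.Set Int) (i : Int) : Int :=
  if PySem.Set.contains flagged (i - PySem.Int.mod i 3 + 2) then
    PySem.List.pyGetD content i 0 - (if PySem.Int.mod i 3 == 0 then 256 else 255)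
  else
    PySem.List.pyGetD content i 0

def sign_int3_alt (content : List Int) : List Int :=
  (PySem.List.pyRange 0 (content.length : Int) 1).map
    (signB_elem content (signB_flagged content))

-- ===== PRECONDITION & SPEC =====
def Spec_sign_int3 (content : List Int) (out : List Int) : Prop := out = sign_int3_alt content
instance (content : List Int) (out : List Int) : Decidable (Spec_sign_int3 content out) := by unfold Spec_sign_int3; infer_instance

-- ===== CLAIM (what is proved, stated in full; the proofs are below) =====
def Claim_equal_sign_int3 : Prop := ∀ (content : List Int), Dom_sign_int3 content → Spec_sign_int3 content (sign_int3 content)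

-- ===== LEMMAS AND PROOFS =====

-- proof-only middle form: the result, triple by triple
def signChunk : List Int → List Int
  | a :: b :: c :: rest =>
      (if c > 127 then [a - 256, b - 255, c - 255] else [a, b, c]) ++ signChunk rest
  | rest => rest

-- A's first loop is an identity copy
lemma signA_copy_eq (content : List Int) :
    (PySem.List.pyRange 0 (content.length : Int) 1).foldl
      (fun sb i => sb ++ [PySem.List.pyGetD content i 0]) [] = content := by
  rw [PySem.List.foldl_append_singleton_eq_map]
  simpa using PySem.List.map_pyGetD_pyRange_zero content 0

-- indexing/updating past a fixed length-3 prefix acts on the tail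
lemma signA_getD3 (p q r d : Int) (xs : List Int) (n : Nat) :
    PySem.List.pyGetD (p :: q :: r :: xs) ((n : Int) + 3) d = PySem.List.pyGetD xs (n : Int) d := by
  have : (n : Int) + 3 = ((n + 3 : Nat) : Int) := by push_cast; ring
  rw [this, PySem.List.pyGetD_natCast, PySem.List.pyGetD_natCast]
  simp [List.getD]

lemma signA_setD3 (p q r v : Int) (xs : List Int) (n : Nat) :
    PySem.List.pySetD (p :: q :: r :: xs) ((n : Int) + 3) v
      = p :: q :: r :: PySem.List.pySetD xs ((n : Int)) v := by
  have : (n : Int) + 3 = ((n + 3 : Nat) : Int) := by push_cast; ring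
  rw [this, PySem.List.pySetD_natCast, PySem.List.pySetD_natCast]
  simp [List.set]

-- a step at index k+1 leaves a length-3 prefix alone and acts as the step at k on the tail
lemma signA_step_shift (p q r : Int) (xs : List Int) (k : Nat) :
    signA_step (p :: q :: r :: xs) ((k : Int) + 1) = p :: q :: r :: signA_step xs (k : Int) := by
  unfold signA_step
  have h2 : 3 * ((k : Int) + 1) + 2 = ((3 * k + 2 : Nat) : Int) + 3 := by push_cast; ring
  have h1 : 3 * ((k : Int) + 1) + 1 = ((3 * k + 1 : Nat) : Int) + 3 := by push_cast; ring
  have h0 : 3 * ((k : Int) + 1) = ((3 * k : Nat) : Int) + 3 := by push_cast; ring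
  have g2 : 3 * (k : Int) + 2 = ((3 * k + 2 : Nat) : Int) := by push_cast; ring
  have g1 : 3 * (k : Int) + 1 = ((3 * k + 1 : Nat) : Int) := by push_cast; ring
  have g0 : 3 * (k : Int) = ((3 * k : Nat) : Int) := by push_cast; ring
  rw [h2, h1, h0, g2, g1, g0, signA_getD3]
  split
  · simp only [signA_setD3, signA_getD3]
  · rfl

-- the whole remaining loop slides past a fixed length-3 prefix
lemma signA_foldl_shift (p q r : Int) (xs : List Int) (l : List Nat) :
    (l.map (fun k : Nat => ((k : Int) + 1))).foldl signA_step (p :: q :: r :: xs)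
      = p :: q :: r :: (l.map (fun k : Nat => (k : Int))).foldl signA_step xs := by
  induction l generalizing xs with
  | nil => rfl
  | cons k l ih => simp only [List.map_cons, List.foldl_cons, signA_step_shift, ih]

-- first step of the loop on a 3-chunk emits one adjusted triple
lemma signA_step_zero (a b c : Int) (rest : List Int) :
    signA_step (a :: b :: c :: rest) 0
      = (if c > 127 then [a - 256, b - 255, c - 255] else [a, b, c]) ++ rest := by
  unfold signA_step
  have e2 : (3 : Int) * 0 + 2 = ((2 : Nat) : Int) := by norm_num
  have e1 : (3 : Int) * 0 + 1 = ((1 : Nat) : Int) := by norm_num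
  have e0 : (3 : Int) * 0 = ((0 : Nat) : Int) := by norm_num
  rw [e2, e1, e0]
  simp only [PySem.List.pyGetD_natCast, PySem.List.pySetD_natCast]
  split <;> rename_i h <;> simp [List.getD] at h
  · simp [h]
  · rw [if_neg (by omega)]; rfl

-- A's mutation loop over range(len//3) computes the chunked middle form
lemma signA_loop_eq (xs : List Int) :
    (PySem.List.pyRange 0 (PySem.Int.floordiv (xs.length : Int) 3) 1).foldl signA_step xs
      = signChunk xs := by
  induction xs using signChunk.induct with
  | case1 a b c rest ih =>
    have hlen : ((a :: b :: c :: rest).length : Int) = ((rest.length + 3 : Nat) : Int) := by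
      push_cast [List.length_cons]; ring
    rw [hlen]
    have hfd : PySem.Int.floordiv ((rest.length + 3 : Nat) : Int) 3
        = (((rest.length + 3) / 3 : Nat) : Int) := by
      exact_mod_cast PySem.Int.floordiv_natCast (rest.length + 3) 3
    rw [hfd, PySem.List.pyRange_zero_natCast]
    have hdiv : (rest.length + 3) / 3 = rest.length / 3 + 1 := by omega
    rw [hdiv, List.range_succ_eq_map, List.map_cons, List.foldl_cons, List.map_map]
    have hmap : (List.map ((fun k => ((k : Nat) : Int)) ∘ Nat.succ) (List.range (rest.length / 3)))
        = List.map (fun k => ((k : Nat) : Int) + 1) (List.range (rest.length / 3)) := by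
      apply List.map_congr_left
      intro k _
      simp [Nat.succ_eq_add_one]
    have hfd' : PySem.Int.floordiv ((rest.length : Nat) : Int) 3
        = ((rest.length / 3 : Nat) : Int) := by
      exact_mod_cast PySem.Int.floordiv_natCast rest.length 3
    rw [hfd', PySem.List.pyRange_zero_natCast] at ih
    rw [Nat.cast_zero, signA_step_zero, hmap]
    by_cases hc : c > 127
    · rw [if_pos hc]
      simp only [List.cons_append, List.nil_append]
      rw [signA_foldl_shift, ih]
      simp [signChunk, hc]
    · rw [if_neg hc]
      simp only [List.cons_append, List.nil_append]
      rw [signA_foldl_shift, ih]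
      simp [signChunk, hc]
  | case2 rest h =>
    have hlen : rest.length < 3 := by
      match rest with
      | [] => simp
      | [_] => simp
      | [_, _] => simp
      | a :: b :: c :: r => exact absurd rfl (h a b c r)
    have : PySem.Int.floordiv ((rest.length : Nat) : Int) 3 = ((rest.length / 3 : Nat) : Int) := by
      exact_mod_cast PySem.Int.floordiv_natCast rest.length 3
    rw [this]
    have hz : rest.length / 3 = 0 := by omega
    rw [hz, Nat.cast_zero]
    have : PySem.List.pyRange 0 0 1 = [] := by decide
    rw [this, List.foldl_nil]
    match rest, h with
    | [], _ => rfl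
    | [_], _ => rfl
    | [_, _], _ => rfl
    | a :: b :: c :: r, h => exact absurd rfl (h a b c r)

-- membership in B's flagged set, characterised
lemma signB_mem_flagged (content : List Int) (x : Int) :
    PySem.Set.contains (signB_flagged content) x = true ↔
      (0 ≤ x ∧ x < (content.length : Int) ∧ PySem.Int.mod x 3 = 2 ∧
        PySem.List.pyGetD content x 0 > 127) := by
  unfold signB_flagged
  rw [PySem.Set.contains_iff, PySem.Set.mem_ofList, List.mem_filter,
    PySem.List.mem_pyRange_one]
  simp [and_assoc]

-- Python `n % 3` on a nonnegative operand
lemma signB_mod3 (n : Nat) : PySem.Int.mod ((n : Int)) 3 = ((n % 3 : Nat) : Int) := by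
  simp

lemma signB_mod3_shift (n : Nat) :
    PySem.Int.mod ((n : Int) + 3) 3 = PySem.Int.mod (n : Int) 3 := by
  have hc : ((n : Int) + 3) = ((n + 3 : Nat) : Int) := by push_cast; ring
  rw [hc, signB_mod3, signB_mod3]
  congr 1
  omega

-- flag membership slides past a length-3 prefix
lemma signB_contains_shift (a b c : Int) (rest : List Int) (n : Nat) :
    PySem.Set.contains (signB_flagged (a :: b :: c :: rest)) ((n : Int) + 3)
      = PySem.Set.contains (signB_flagged rest) ((n : Int)) := by
  rw [Bool.eq_iff_iff, signB_mem_flagged, signB_mem_flagged]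
  have hget := signA_getD3 a b c 0 rest n
  constructor
  · rintro ⟨_, hlt, hm, hg⟩
    refine ⟨by positivity, ?_, ?_, ?_⟩
    · simp only [List.length_cons] at hlt
      push_cast at hlt ⊢
      omega
    · rwa [signB_mod3_shift] at hm
    · rwa [hget] at hg
  · rintro ⟨_, hlt, hm, hg⟩
    refine ⟨by positivity, ?_, ?_, ?_⟩
    · simp only [List.length_cons]
      push_cast
      omega
    · rwa [signB_mod3_shift]
    · rwa [hget]

-- B's element at a shifted index equals B's element on the tail
lemma signB_elem_shift (a b c : Int) (rest : List Int) (k : Nat) :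
    signB_elem (a :: b :: c :: rest) (signB_flagged (a :: b :: c :: rest)) ((k : Int) + 3)
      = signB_elem rest (signB_flagged rest) (k : Int) := by
  have hsub : ((k - k % 3 + 2 : Nat) : Int) = (k : Int) - PySem.Int.mod (k : Int) 3 + 2 := by
    rw [signB_mod3]
    have hle : k % 3 ≤ k := Nat.mod_le k 3
    push_cast [hle]
    ring
  unfold signB_elem
  rw [signB_mod3_shift, signA_getD3 a b c 0 rest k]
  have harg : (k : Int) + 3 - PySem.Int.mod (k : Int) 3 + 2
      = ((k - k % 3 + 2 : Nat) : Int) + 3 := by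
    rw [hsub]; ring
  rw [harg, signB_contains_shift a b c rest (k - k % 3 + 2), hsub]

-- on a list shorter than 3 B changes nothing
lemma signB_short (rest : List Int) (h : rest.length < 3) :
    sign_int3_alt rest = rest := by
  unfold sign_int3_alt
  have : (PySem.List.pyRange 0 (rest.length : Int) 1).map
        (signB_elem rest (signB_flagged rest))
      = (PySem.List.pyRange 0 (rest.length : Int) 1).map
        (fun j => PySem.List.pyGetD rest j 0) := by
    apply List.map_congr_left
    intro j hj
    rw [PySem.List.mem_pyRange_one] at hj
    obtain ⟨n, rfl⟩ := Int.eq_ofNat_of_zero_le hj.1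
    have hn : n < 3 := by
      have := hj.2
      push_cast at this
      omega
    unfold signB_elem
    have hmodj : PySem.Int.mod ((n : Int)) 3 = (n : Int) := by
      rw [signB_mod3]
      congr 1
      omega
    rw [if_neg]
    rw [hmodj]
    have harg : (n : Int) - (n : Int) + 2 = (2 : Int) := by ring
    rw [harg]
    intro hc
    rw [signB_mem_flagged] at hc
    have h2 := hc.2.1
    push_cast at h2
    omega
  rw [this]
  exact PySem.List.map_pyGetD_pyRange_zero rest 0

-- B computes the chunked middle form
lemma signB_eq_chunk (xs : List Int) : sign_int3_alt xs = signChunk xs := by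
  induction xs using signChunk.induct with
  | case1 a b c rest ih =>
    unfold sign_int3_alt
    have hlen : ((a :: b :: c :: rest).length : Int) = ((3 + rest.length : Nat) : Int) := by
      push_cast [List.length_cons]; ring
    rw [hlen, PySem.List.pyRange_zero_natCast, List.range_add, List.map_append,
      List.map_append]
    simp only [List.map_map]
    have htail : (List.range rest.length).map
          ((signB_elem (a :: b :: c :: rest) (signB_flagged (a :: b :: c :: rest)))
            ∘ ((fun k : Nat => (k : Int)) ∘ (fun x => 3 + x)))
        = (List.range rest.length).map
          ((signB_elem rest (signB_flagged rest)) ∘ (fun k : Nat => (k : Int))) := by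
      apply List.map_congr_left
      intro k _
      simp only [Function.comp_apply]
      have : ((3 + k : Nat) : Int) = (k : Int) + 3 := by push_cast; ring
      rw [this, signB_elem_shift]
    rw [htail]
    have hb : (List.range rest.length).map
          ((signB_elem rest (signB_flagged rest)) ∘ (fun k : Nat => (k : Int)))
        = sign_int3_alt rest := by
      unfold sign_int3_alt
      rw [PySem.List.pyRange_zero_natCast, List.map_map]
    rw [hb, ih]
    -- evaluate the three head elements
    have hc2 : PySem.Set.contains (signB_flagged (a :: b :: c :: rest)) 2
        = decide (c > 127) := by
      have hg2 : PySem.List.pyGetD (a :: b :: c :: rest) 2 0 = c := by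
        have h2 : (2 : Int) = ((2 : Nat) : Int) := by norm_num
        rw [h2, PySem.List.pyGetD_natCast]; rfl
      rw [Bool.eq_iff_iff, signB_mem_flagged]
      simp only [decide_eq_true_eq]
      constructor
      · rintro ⟨_, _, _, hg⟩
        rwa [hg2] at hg
      · intro hg
        refine ⟨by norm_num, ?_, by decide, by rwa [hg2]⟩
        simp only [List.length_cons]; push_cast; omega
    have he0 : signB_elem (a :: b :: c :: rest) (signB_flagged (a :: b :: c :: rest)) 0
        = if c > 127 then a - 256 else a := by
      unfold signB_elem
      have hm : PySem.Int.mod (0 : Int) 3 = 0 := by decide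
      have hg : PySem.List.pyGetD (a :: b :: c :: rest) 0 0 = a := by
        have h0 : (0 : Int) = ((0 : Nat) : Int) := by norm_num
        rw [h0, PySem.List.pyGetD_natCast]; rfl
      rw [hm, hg]
      have harg : (0 : Int) - 0 + 2 = (2 : Int) := by norm_num
      rw [harg, hc2]
      by_cases h : c > 127 <;> simp [h]
    have he1 : signB_elem (a :: b :: c :: rest) (signB_flagged (a :: b :: c :: rest)) 1
        = if c > 127 then b - 255 else b := by
      unfold signB_elem
      have hm : PySem.Int.mod (1 : Int) 3 = 1 := by decide
      have hg : PySem.List.pyGetD (a :: b :: c :: rest) 1 0 = b := by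
        have h1 : (1 : Int) = ((1 : Nat) : Int) := by norm_num
        rw [h1, PySem.List.pyGetD_natCast]; rfl
      rw [hm, hg]
      have harg : (1 : Int) - 1 + 2 = (2 : Int) := by norm_num
      rw [harg, hc2]
      by_cases h : c > 127 <;> simp [h]
    have he2 : signB_elem (a :: b :: c :: rest) (signB_flagged (a :: b :: c :: rest)) 2
        = if c > 127 then c - 255 else c := by
      unfold signB_elem
      have hm : PySem.Int.mod (2 : Int) 3 = 2 := by decide
      have hg : PySem.List.pyGetD (a :: b :: c :: rest) 2 0 = c := by
        have h2 : (2 : Int) = ((2 : Nat) : Int) := by norm_num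
        rw [h2, PySem.List.pyGetD_natCast]; rfl
      rw [hm, hg]
      have harg : (2 : Int) - 2 + 2 = (2 : Int) := by norm_num
      rw [harg, hc2]
      by_cases h : c > 127 <;> simp [h]
    have hr3 : List.range 3 = [0, 1, 2] := by decide
    rw [hr3]
    simp only [List.map_cons, List.map_nil, Function.comp_apply, Nat.cast_zero,
      Nat.cast_one, Nat.cast_ofNat]
    rw [he0, he1, he2]
    conv_rhs => rw [signChunk]
    by_cases h : c > 127 <;> simp [h]
  | case2 rest h =>
    have hlen : rest.length < 3 := by
      match rest with
      | [] => simp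
      | [_] => simp
      | [_, _] => simp
      | a :: b :: c :: r => exact absurd rfl (h a b c r)
    rw [signB_short rest hlen]
    match rest, h with
    | [], _ => rfl
    | [_], _ => rfl
    | [_, _], _ => rfl
    | a :: b :: c :: r, h => exact absurd rfl (h a b c r)

-- ===== VERDICT (by name: the statement is the Claim_ definition above) =====
theorem sign_int3_spec : Claim_equal_sign_int3 := by
  intro content _
  unfold Spec_sign_int3 sign_int3
  simp only [signA_copy_eq]
  rw [signA_loop_eq, signB_eq_chunk]
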